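-- pv_equiv track=rewrite | github.com/IHateTheWorld/At_HIT | NLP/CWS/cws_mm.py | calculate_2sent
-- ===== SOURCE A (Python) =====
-- def calculate_2sent(n_correct, sent1, sent2):
--     trans1, trans2 = set(), set()
--     start, end = 0, 0
--     for s in sent1:
--         end += len(s)
--         trans1.add(tuple((start, end)))
--         start = end
--     start, end = 0, 0
--     for s in sent2:
--         end += len(s)
--         trans2.add(tuple((start, end)))
--         start = end
--     n_correct += len(trans1 & trans2)
--
--     return n_correct
-- ===== SOURCE B (Python) =====
-- def calculate_2sent(n_correct, sent1, sent2):
--     def intervals(sent):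
--         res = []
--         end = 0
--         for s in sent:
--             start = end
--             end += len(s)
--             res.append((start, end))
--         return res
--     a = intervals(sent1)
--     b = intervals(sent2)
--     i, j, matches = 0, 0, 0
--     while i < len(a) and j < len(b):
--         if a[i] < b[j]:
--             i += 1
--         elif b[j] < a[i]:
--             j += 1
--         else:
--             v = a[i]
--             matches += 1
--             while i < len(a) and a[i] == v:
--                 i += 1
--             while j < len(b) and b[j] == v:
--                 j += 1
--     return n_correct + matches
-- ===== Notes on version B (the rewrite author's own statement) =====
-- stated objective: alternative
-- what changed: Replaces A's two hash-set builds plus set intersection with explicit sorted (start,end) interval lists consumed by a two-pointer merge that counts a match per distinct common interval, skipping duplicate runs on both sides.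
import Mathlib
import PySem

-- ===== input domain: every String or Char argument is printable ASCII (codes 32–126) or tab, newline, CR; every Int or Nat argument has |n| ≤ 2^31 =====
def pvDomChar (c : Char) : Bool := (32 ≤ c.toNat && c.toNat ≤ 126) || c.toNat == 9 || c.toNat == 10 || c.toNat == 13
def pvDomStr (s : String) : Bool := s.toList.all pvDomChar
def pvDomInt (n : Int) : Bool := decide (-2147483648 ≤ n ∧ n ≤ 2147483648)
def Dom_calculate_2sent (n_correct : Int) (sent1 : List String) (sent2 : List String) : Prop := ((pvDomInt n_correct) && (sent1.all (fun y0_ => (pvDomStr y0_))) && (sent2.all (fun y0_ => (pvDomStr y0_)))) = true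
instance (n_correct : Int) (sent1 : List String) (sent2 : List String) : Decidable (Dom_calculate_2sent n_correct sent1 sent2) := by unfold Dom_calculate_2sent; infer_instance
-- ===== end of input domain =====

-- B replaces A's two hash-set builds and set intersection by sorted interval lists consumed by a two-pointer merge that skips duplicate runs (objective: alternative).

-- ===== PORT A =====
-- state = (trans, start, end); 'end += len(s); trans.add((start, end)); start = end'
def calculate_2sent (n_correct : Int) (sent1 : List String) (sent2 : List String) : Int :=
  let st1 := sent1.foldl
    (fun (st : PySem.Set (Int × Int) × Int × Int) s =>
      let e := st.2.2 + PySem.Str.len s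
      (PySem.Set.add st.1 (st.2.1, e), e, e)) (PySem.Set.empty, 0, 0)
  let st2 := sent2.foldl
    (fun (st : PySem.Set (Int × Int) × Int × Int) s =>
      let e := st.2.2 + PySem.Str.len s
      (PySem.Set.add st.1 (st.2.1, e), e, e)) (PySem.Set.empty, 0, 0)
  n_correct + PySem.Set.len (PySem.Set.inter st1.1 st2.1)

-- ===== PORT B =====
-- Source B's intervals(sent): state = (res, end)
def pvIntervals (sent : List String) : List (Int × Int) × Int :=
  sent.foldl
    (fun (st : List (Int × Int) × Int) s =>
      let e := st.2 + PySem.Str.len s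
      (st.1 ++ [(st.2, e)], e)) ([], 0)

-- Python tuple comparison a[i] < b[j] (lexicographic on pairs of ints)
def pvPairLt (x y : Int × Int) : Bool := x.1 < y.1 || (x.1 == y.1 && x.2 < y.2)

-- Source B's two-pointer merge loop; the inner whiles skip the duplicate run on each side
def pvMergeCount : List (Int × Int) → List (Int × Int) → Int
  | [], _ => 0
  | _ :: _, [] => 0
  | x :: xs, y :: ys =>
    if pvPairLt x y then pvMergeCount xs (y :: ys)
    else if pvPairLt y x then pvMergeCount (x :: xs) ys
    else 1 + pvMergeCount (xs.dropWhile (· == x)) (ys.dropWhile (· == y))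
termination_by xs ys => xs.length + ys.length
decreasing_by
  all_goals simp
  all_goals (have h1 := List.length_dropWhile_le (fun b => b == x) xs;
             have h2 := List.length_dropWhile_le (fun b => b == y) ys;
             simp at h1 h2; omega)

def calculate_2sent_alt (n_correct : Int) (sent1 : List String) (sent2 : List String) : Int :=
  n_correct + pvMergeCount (pvIntervals sent1).1 (pvIntervals sent2).1

-- ===== PRECONDITION & SPEC =====
def Spec_calculate_2sent (n_correct : Int) (sent1 : List String) (sent2 : List String) (out : Int) : Prop := out = calculate_2sent_alt n_correct sent1 sent2
instance (n_correct : Int) (sent1 : List String) (sent2 : List String) (out : Int) : Decidable (Spec_calculate_2sent n_correct sent1 sent2 out) := by unfold Spec_calculate_2sent; infer_instance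

-- ===== CLAIM (what is proved, stated in full; the proofs are below) =====
def Claim_equal_calculate_2sent : Prop := ∀ (n_correct : Int) (sent1 : List String) (sent2 : List String), Dom_calculate_2sent n_correct sent1 sent2 → Spec_calculate_2sent n_correct sent1 sent2 (calculate_2sent n_correct sent1 sent2)

-- ===== LEMMAS AND PROOFS =====

-- lexicographic ≤ on pairs, the order in which pvIntervals lists are produced
def pvPairLe (x y : Int × Int) : Prop := x.1 < y.1 ∨ (x.1 = y.1 ∧ x.2 ≤ y.2)

-- A's fold produces exactly the set of B's interval list, with the same running end
theorem pvFold_rel (ws : List String) (acc : List (Int × Int)) (e : Int) :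
    ws.foldl
      (fun (st : PySem.Set (Int × Int) × Int × Int) s =>
        let e := st.2.2 + PySem.Str.len s
        (PySem.Set.add st.1 (st.2.1, e), e, e)) (PySem.Set.ofList acc, e, e)
    = (PySem.Set.ofList (ws.foldl
        (fun (st : List (Int × Int) × Int) s =>
          let e := st.2 + PySem.Str.len s
          (st.1 ++ [(st.2, e)], e)) (acc, e)).1,
       (ws.foldl
        (fun (st : List (Int × Int) × Int) s =>
          let e := st.2 + PySem.Str.len s
          (st.1 ++ [(st.2, e)], e)) (acc, e)).2,
       (ws.foldl
        (fun (st : List (Int × Int) × Int) s =>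
          let e := st.2 + PySem.Str.len s
          (st.1 ++ [(st.2, e)], e)) (acc, e)).2) := by
  induction ws generalizing acc e with
  | nil => rfl
  | cons w ws ih =>
    simp only [List.foldl_cons]
    rw [← PySem.Set.ofList_append_singleton]
    exact ih (acc ++ [(e, e + PySem.Str.len w)]) (e + PySem.Str.len w)

-- the interval list is produced in non-decreasing lexicographic order
theorem pvIntervals_sorted (ws : List String) (acc : List (Int × Int)) (e : Int)
    (hb : ∀ p ∈ acc, p.1 ≤ p.2 ∧ p.2 ≤ e) (hp : acc.Pairwise pvPairLe) :
    (∀ p ∈ (ws.foldl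
        (fun (st : List (Int × Int) × Int) s =>
          let e := st.2 + PySem.Str.len s
          (st.1 ++ [(st.2, e)], e)) (acc, e)).1,
      p.1 ≤ p.2 ∧ p.2 ≤ (ws.foldl
        (fun (st : List (Int × Int) × Int) s =>
          let e := st.2 + PySem.Str.len s
          (st.1 ++ [(st.2, e)], e)) (acc, e)).2)
    ∧ (ws.foldl
        (fun (st : List (Int × Int) × Int) s =>
          let e := st.2 + PySem.Str.len s
          (st.1 ++ [(st.2, e)], e)) (acc, e)).1.Pairwise pvPairLe := by
  induction ws generalizing acc e with
  | nil => exact ⟨hb, hp⟩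
  | cons w ws ih =>
    have hL : (0 : Int) ≤ PySem.Str.len w := by
      rw [PySem.Str.len_eq]; positivity
    simp only [List.foldl_cons]
    apply ih
    · intro p hpm
      rcases List.mem_append.mp hpm with h | h
      · have := hb p h; constructor <;> omega
      · simp only [List.mem_singleton] at h; subst h; simp only []; omega
    · rw [List.pairwise_append]
      refine ⟨hp, by simp [pvPairLe], ?_⟩
      intro p hpm q hq
      simp only [List.mem_singleton] at hq; subst hq
      have := hb p hpm
      unfold pvPairLe
      simp only []
      omega

-- antisymmetry of pvPairLe
theorem pvPairLe_antisymm {x y : Int × Int} (h1 : pvPairLe x y) (h2 : pvPairLe y x) : x = y := by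
  unfold pvPairLe at h1 h2
  have : x.1 = y.1 ∧ x.2 = y.2 := by omega
  exact Prod.ext this.1 this.2

-- x does not survive dropping its own run from a sorted list of elements all ≥ x
theorem pvNot_mem_dropWhile (x : Int × Int) (l : List (Int × Int))
    (hall : ∀ b ∈ l, pvPairLe x b) (hp : l.Pairwise pvPairLe) :
    x ∉ l.dropWhile (· == x) := by
  induction l with
  | nil => simp
  | cons b t ih =>
    by_cases hbx : b = x
    · subst hbx
      rw [List.dropWhile_cons_of_pos (by simp)]
      exact ih (fun c hc => hall c (List.mem_cons_of_mem _ hc)) hp.tail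
    · rw [List.dropWhile_cons_of_neg (by simpa using hbx)]
      intro hmem
      rcases List.mem_cons.mp hmem with h | h
      · exact hbx h.symm
      · have h1 : pvPairLe b x := (List.pairwise_cons.mp hp).1 x h
        have h2 : pvPairLe x b := hall b (List.mem_cons_self)
        exact hbx (pvPairLe_antisymm h1 h2)

-- toFinset of a list after dropping the duplicate run of its head
theorem pvToFinset_cons_drop (x : Int × Int) (l : List (Int × Int)) :
    (x :: l).toFinset = insert x (l.dropWhile (· == x)).toFinset := by
  have hsplit : l = l.takeWhile (· == x) ++ l.dropWhile (· == x) :=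
    (List.takeWhile_append_dropWhile).symm
  apply Finset.ext
  intro a
  simp only [List.toFinset_cons, Finset.mem_insert, List.mem_toFinset]
  constructor
  · rintro (h | h)
    · exact Or.inl h
    · rw [hsplit] at h
      rcases List.mem_append.mp h with h | h
      · have := List.mem_takeWhile_imp h
        simp at this; exact Or.inl this
      · exact Or.inr h
  · rintro (h | h)
    · exact Or.inl h
    · exact Or.inr (by rw [hsplit]; exact List.mem_append_right _ h)

-- the two-pointer merge counts exactly the distinct common values of two sorted lists
theorem pvMergeCount_eq (xs ys : List (Int × Int))
    (hx : xs.Pairwise pvPairLe) (hy : ys.Pairwise pvPairLe) :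
    pvMergeCount xs ys = ((xs.toFinset ∩ ys.toFinset).card : Int) := by
  fun_induction pvMergeCount xs ys with
  | case1 ys => simp
  | case2 x xs => simp

  | case3 x xs y ys hlt ih =>
    have hxny : x ∉ (y :: ys).toFinset := by
      simp only [List.mem_toFinset]
      intro hmem
      have hyb : pvPairLe y x := by
        rcases List.mem_cons.mp hmem with h | h
        · exact h ▸ (Or.inr ⟨rfl, le_refl _⟩)
        · exact (List.pairwise_cons.mp hy).1 x h
      unfold pvPairLt at hlt; unfold pvPairLe at hyb
      simp at hlt; omega
    rw [List.toFinset_cons, Finset.insert_inter_of_notMem hxny]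
    exact ih hx.tail hy
  | case4 x xs y ys hlt hlt2 ih =>
    have hynx : y ∉ (x :: xs).toFinset := by
      simp only [List.mem_toFinset]
      intro hmem
      have hxb : pvPairLe x y := by
        rcases List.mem_cons.mp hmem with h | h
        · exact h ▸ (Or.inr ⟨rfl, le_refl _⟩)
        · exact (List.pairwise_cons.mp hx).1 y h
      unfold pvPairLt at hlt2; unfold pvPairLe at hxb
      simp at hlt2; omega
    rw [Finset.inter_comm, List.toFinset_cons (l := ys), Finset.insert_inter_of_notMem hynx,
        Finset.inter_comm]
    exact ih hx hy.tail
  | case5 x xs y ys hlt hlt2 ih =>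
    have hxy : x = y := by
      unfold pvPairLt at hlt hlt2
      simp at hlt hlt2
      exact Prod.ext (by omega) (by omega)
    subst hxy
    have hax : ∀ b ∈ xs, pvPairLe x b := fun b hb => (List.pairwise_cons.mp hx).1 b hb
    have hay : ∀ b ∈ ys, pvPairLe x b := fun b hb => (List.pairwise_cons.mp hy).1 b hb
    have hdx : xs.Pairwise pvPairLe := hx.tail
    have hdy : ys.Pairwise pvPairLe := hy.tail
    have hnx := pvNot_mem_dropWhile x xs hax hdx
    have hny := pvNot_mem_dropWhile x ys hay hdy
    rw [pvToFinset_cons_drop x xs, pvToFinset_cons_drop x ys,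
        ← Finset.insert_inter_distrib]
    rw [Finset.card_insert_of_notMem (by
      simp only [Finset.mem_inter, List.mem_toFinset]
      intro h; exact hnx h.1)]
    rw [ih (hdx.sublist (List.dropWhile_sublist _))
          (hdy.sublist (List.dropWhile_sublist _))]
    push_cast; ring

-- Set.len of the intersection of two ofList sets is the Finset intersection card
theorem pvSetLen_inter (l1 l2 : List (Int × Int)) :
    PySem.Set.len (PySem.Set.inter (PySem.Set.ofList l1) (PySem.Set.ofList l2))
    = ((l1.toFinset ∩ l2.toFinset).card : Int) := by
  have hnd : ((PySem.Set.ofList l1).filter (fun x => (PySem.Set.ofList l2).contains x)).Nodup :=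
    (PySem.Set.nodup_ofList l1).filter _
  have htf : ((PySem.Set.ofList l1).filter (fun x => (PySem.Set.ofList l2).contains x)).toFinset
      = l1.toFinset ∩ l2.toFinset := by
    apply Finset.ext
    intro a
    simp only [List.mem_toFinset, List.mem_filter, Finset.mem_inter,
      PySem.Set.mem_ofList, PySem.Set.contains_eq_listContains]
    constructor
    · rintro ⟨h1, h2⟩
      exact ⟨h1, by simpa [PySem.Set.mem_ofList] using List.contains_iff_mem.mp h2⟩
    · rintro ⟨h1, h2⟩
      exact ⟨h1, List.contains_iff_mem.mpr (by simpa [PySem.Set.mem_ofList] using h2)⟩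
  have := List.toFinset_card_of_nodup hnd
  rw [htf] at this
  simp only [PySem.Set.len, PySem.Set.inter, this]

-- ===== VERDICT (by name: the statement is the Claim_ definition above) =====
theorem calculate_2sent_spec : Claim_equal_calculate_2sent := by
  intro n s1 s2 _
  unfold Spec_calculate_2sent
  have h1 := pvFold_rel s1 [] 0
  have h2 := pvFold_rel s2 [] 0
  have he : (PySem.Set.ofList ([] : List (Int × Int))) = PySem.Set.empty := rfl
  rw [he] at h1 h2
  have hs1 := pvIntervals_sorted s1 [] 0 (by simp) (by simp)
  have hs2 := pvIntervals_sorted s2 [] 0 (by simp) (by simp)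
  dsimp only [calculate_2sent, calculate_2sent_alt, pvIntervals]
  rw [h1, h2, pvSetLen_inter, pvMergeCount_eq _ _ hs1.2 hs2.2]
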